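-- pv_equiv track=rewrite | github.com/ReyhanArdiya/Jay-ds-algo | mine/ch-11/split_str_search.py | split_str_search
-- ===== SOURCE A (Python) =====
-- from math import ceil
--
-- def halve_str(string: str):
--     splitted_str = string.split(" ")
--     if len(splitted_str) > 1:
--         half = ceil(len(splitted_str) / 2)
--
--         return [" ".join(splitted_str[:half]), " ".join(splitted_str[half:])]
--
--     return [string]
--
-- def halve_str_arr(str_arr: list):
--     halved_str_arr = [halve_str(string) for string in str_arr]
--
--     flatten = []
--     for arr in halved_str_arr:
--         if isinstance(arr, list):
--             for string in arr:
--                 flatten.append(string)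
--
--     is_changed = False
--     i = 0
--     for changed_string in flatten:
--         if changed_string != str_arr[i]:
--             is_changed = True
--             break
--         i += 1
--
--     return flatten if is_changed else False
--
-- def split_str_search(string: str, q: str):
--     seperated_str = string if isinstance(string, list) else string.split(" ")
--
--     if len(seperated_str) == 0:
--         return 0
--
--     match_count = 0
--     halved_q = [q]
--     while halved_q:
--         for query in halved_q:
--             if query.lower() in seperated_str[0].lower():
--                 match_count += 1
--
--         halved_q = halve_str_arr(halved_q)
--
--     # Return the current match_count PLUS the match count of seperated_str except for the first item
--     return match_count + split_str_search(seperated_str[1:], q)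
-- ===== SOURCE B (Python) =====
-- def _halve(f):
--     ws = f.split(" ")
--     h = (len(ws) + 1) // 2
--     if h < len(ws):
--         return (" ".join(ws[:h]), " ".join(ws[h:]))
--     return None
--
-- def _settle_depth(f):
--     parts = _halve(f)
--     if parts is None:
--         return 0
--     return 1 + max(_settle_depth(parts[0]), _settle_depth(parts[1]))
--
-- def _weighted_frags(q):
--     out = []
--     def rec(f, r):
--         parts = _halve(f)
--         if parts is None:
--             out.append((f, r + 1))
--         else:
--             out.append((f, 1))
--             rec(parts[0], r - 1)
--             rec(parts[1], r - 1)
--     rec(q, _settle_depth(q))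
--     return out
--
-- def split_str_search(string, q):
--     frags = _weighted_frags(q)
--     words = string if isinstance(string, list) else string.split(" ")
--     if len(words) == 0:
--         return 0
--     total = 0
--     for w in words:
--         wl = w.lower()
--         for f, m in frags:
--             if f.lower() in wl:
--                 total += m
--     return total
-- ===== Notes on version B (the rewrite author's own statement) =====
-- stated objective: alternative
-- what changed: B precomputes, once, the weighted fragment list of the query (each node of the halving tree with its level-persistence multiplicity, a single-word fragment at depth d weighted D-d+1 where D is the settle depth) and then counts with one flat double loop over words x fragments, instead of A's re-running the whole level-by-level halving while-loop (with its list-changed check) for every word inside a recursion that peels one word per call.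
import Mathlib
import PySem

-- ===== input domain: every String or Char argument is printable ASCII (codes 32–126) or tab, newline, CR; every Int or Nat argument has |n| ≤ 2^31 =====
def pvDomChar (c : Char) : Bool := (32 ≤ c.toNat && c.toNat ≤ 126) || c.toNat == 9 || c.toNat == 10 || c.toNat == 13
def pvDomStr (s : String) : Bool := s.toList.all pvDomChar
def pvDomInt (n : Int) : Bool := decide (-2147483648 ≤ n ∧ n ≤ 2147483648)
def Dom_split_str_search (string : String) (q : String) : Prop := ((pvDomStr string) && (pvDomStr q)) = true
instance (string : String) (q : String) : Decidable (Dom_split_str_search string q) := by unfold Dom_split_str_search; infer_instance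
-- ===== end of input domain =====

-- B replaces A's per-word re-run of the level-by-level query-halving loop by one precomputed
-- weighted fragment list (each fragment of the halving tree with its level-persistence
-- multiplicity) and a flat double loop over words × fragments (objective: alternative;
-- return values proved equal on all inputs).

-- ===== PORT A =====
-- ---- termination infrastructure, cited by the ports' loops (decreasing_by) ----
def pvMySplit (c : Char) : List Char → List (List Char)
  | [] => [[]]
  | a :: t => if a = c then [] :: pvMySplit c t else (pvMySplit c t).modifyHead (a :: ·)

theorem pvMySplit_ne_nil (c : Char) (s : List Char) : pvMySplit c s ≠ [] := by
  cases s with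
  | nil => simp [pvMySplit]
  | cons a t =>
    simp only [pvMySplit]
    split
    · simp
    · cases h : pvMySplit c t with
      | nil => exact absurd h (pvMySplit_ne_nil c t)
      | cons p ps => simp

theorem pvGo_eq2 (c : Char) (fuel : Nat) (l cur : List Char) (acc : List (List Char)) (hf : l.length ≤ fuel) :
    PySem.Chars.splitOn.go [c] fuel l cur acc
      = acc.reverse ++ (pvMySplit c l).modifyHead (cur.reverse ++ ·) := by
  induction fuel generalizing l cur acc with
  | zero =>
    have : l = [] := List.length_eq_zero_iff.mp (Nat.le_zero.mp hf)
    subst this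
    simp [PySem.Chars.splitOn.go, pvMySplit]
  | succ n ih =>
    cases l with
    | nil => simp [PySem.Chars.splitOn.go, pvMySplit]
    | cons a t =>
      have hstep : PySem.Chars.splitOn.go [c] (n+1) (a :: t) cur acc
          = if [c].isPrefixOf (a :: t) then PySem.Chars.splitOn.go [c] n (List.drop 1 (a :: t)) [] (cur.reverse :: acc)
            else PySem.Chars.splitOn.go [c] n t (a :: cur) acc := by
        rw [PySem.Chars.splitOn.go.eq_def]
        rfl
      by_cases hac : a = c
      · subst hac
        rw [hstep, if_pos (by simp [List.isPrefixOf])]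
        rw [ih _ _ _ (by simpa using hf)]
        simp only [pvMySplit, List.drop_succ_cons, List.drop_zero,
          List.reverse_cons, List.reverse_nil, List.modifyHead_cons, List.nil_append,
          List.append_assoc, List.singleton_append]
        cases h : pvMySplit a t with
        | nil => exact absurd h (pvMySplit_ne_nil a t)
        | cons p ps => simp
      · rw [hstep, if_neg (by simp [List.isPrefixOf]; intro h; exact absurd h.symm hac)]
        rw [ih _ _ _ (by simpa using hf)]
        simp only [pvMySplit, if_neg hac]
        cases h : pvMySplit c t with
        | nil => exact absurd h (pvMySplit_ne_nil c t)
        | cons p ps => simp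

theorem pvSplitOn_single (c : Char) (s : List Char) :
    PySem.Chars.splitOn s [c] = pvMySplit c s := by
  unfold PySem.Chars.splitOn
  rw [pvGo_eq2 c (s.length + 1) s [] [] (by omega)]
  cases h : pvMySplit c s with
  | nil => exact absurd h (pvMySplit_ne_nil c s)
  | cons p ps => simp

theorem pvJoin_cons (sep : List Char) (a : Char) (p : List Char) (ps : List (List Char)) :
    PySem.Chars.join sep ((a :: p) :: ps) = a :: PySem.Chars.join sep (p :: ps) := by
  cases ps with
  | nil => simp [PySem.Chars.join_singleton]
  | cons q qs => simp [PySem.Chars.join_cons_cons]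

theorem pvJoin_mySplit (c : Char) (s : List Char) :
    PySem.Chars.join [c] (pvMySplit c s) = s := by
  induction s with
  | nil => simp [pvMySplit, PySem.Chars.join_singleton]
  | cons a t ih =>
    simp only [pvMySplit]
    by_cases hac : a = c
    · subst hac
      rw [if_pos rfl]
      cases h : pvMySplit a t with
      | nil => exact absurd h (pvMySplit_ne_nil a t)
      | cons p ps =>
        rw [PySem.Chars.join_cons_cons]
        rw [h] at ih
        simp [ih]
    · rw [if_neg hac]
      cases h : pvMySplit c t with
      | nil => exact absurd h (pvMySplit_ne_nil c t)
      | cons p ps =>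
        rw [h] at ih
        simp only [List.modifyHead_cons]
        rw [pvJoin_cons, ih]

theorem pvJoin_append (c : Char) (a b : List (List Char)) (ha : a ≠ []) (hb : b ≠ []) :
    PySem.Chars.join [c] (a ++ b)
      = PySem.Chars.join [c] a ++ c :: PySem.Chars.join [c] b := by
  induction a with
  | nil => exact absurd rfl ha
  | cons p ps ih =>
    cases ps with
    | nil =>
      cases b with
      | nil => exact absurd rfl hb
      | cons q qs => simp [PySem.Chars.join_cons_cons, PySem.Chars.join_singleton]
    | cons p2 ps2 =>
      have h2 := ih (by simp)
      simp only [List.cons_append] at h2 ⊢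
      rw [PySem.Chars.join_cons_cons, h2, PySem.Chars.join_cons_cons]
      simp

def pvA_halve (f : String) : List String :=
  let ws := (PySem.Str.split? f " ").getD []
  if ws.length > 1 then
    let half := (ws.length + 1) / 2
    [PySem.Str.join " " (ws.take half), PySem.Str.join " " (ws.drop half)]
  else [f]

theorem pvWs_eq (f : String) :
    ((PySem.Str.split? f " ").getD []) = (pvMySplit ' ' f.toList).map String.ofList := by
  simp [PySem.Str.split?, PySem.Chars.split?, pvSplitOn_single]

theorem pvHalve_cases (f : String) :
    pvA_halve f = [f] ∨
      ∃ h1 h2, pvA_halve f = [h1, h2] ∧ f.toList = h1.toList ++ ' ' :: h2.toList := by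
  unfold pvA_halve
  rw [pvWs_eq]
  by_cases hk : ((pvMySplit ' ' f.toList).map String.ofList).length > 1
  · right
    rw [if_pos hk]
    refine ⟨_, _, rfl, ?_⟩
    have hk' : 1 < (pvMySplit ' ' f.toList).length := by simpa using hk
    have hh1 : 1 ≤ (((pvMySplit ' ' f.toList).map String.ofList).length + 1) / 2 := by
      simp only [List.length_map]; omega
    have hh2 : (((pvMySplit ' ' f.toList).map String.ofList).length + 1) / 2
        < (pvMySplit ' ' f.toList).length := by
      simp only [List.length_map]; omega
    rw [PySem.Str.toList_join, PySem.Str.toList_join]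
    rw [← List.map_take, ← List.map_drop]
    simp only [List.map_map]
    have hcomp : (String.toList ∘ String.ofList) = id := by
      funext l; simp
    rw [hcomp, List.map_id, List.map_id]
    have hsp : (" " : String).toList = [' '] := by decide
    rw [hsp]
    have hjoin : PySem.Chars.join [' ']
        ((pvMySplit ' ' f.toList).take ((((pvMySplit ' ' f.toList).map String.ofList).length + 1) / 2)
          ++ (pvMySplit ' ' f.toList).drop ((((pvMySplit ' ' f.toList).map String.ofList).length + 1) / 2))
        = PySem.Chars.join [' '] ((pvMySplit ' ' f.toList).take ((((pvMySplit ' ' f.toList).map String.ofList).length + 1) / 2))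
          ++ ' ' :: PySem.Chars.join [' '] ((pvMySplit ' ' f.toList).drop ((((pvMySplit ' ' f.toList).map String.ofList).length + 1) / 2)) := by
      apply pvJoin_append
      · rw [Ne, List.take_eq_nil_iff]
        rintro (h | h)
        · omega
        · exact pvMySplit_ne_nil _ _ h
      · rw [Ne, List.drop_eq_nil_iff]
        omega
    rw [← hjoin, List.take_append_drop, pvJoin_mySplit]
  · left
    rw [if_neg hk]

def pvLen (L : List String) : Nat := (L.map (fun f => f.toList.length)).sum

theorem pvLen_nil : pvLen [] = 0 := rfl
theorem pvLen_cons (f : String) (L : List String) :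
    pvLen (f :: L) = f.toList.length + pvLen L := by simp [pvLen]
theorem pvLen_append (a b : List String) : pvLen (a ++ b) = pvLen a + pvLen b := by
  simp [pvLen]

theorem pvHalve_len (f : String) : pvLen (pvA_halve f) ≤ f.toList.length ∧
    (pvA_halve f ≠ [f] → pvLen (pvA_halve f) < f.toList.length) := by
  rcases pvHalve_cases f with h | ⟨h1, h2, h, he⟩
  · rw [h]
    simp [pvLen_cons, pvLen_nil]
  · have hlen : h1.toList.length + h2.toList.length + 1 = f.toList.length := by
      rw [he]; simp; omega
    rw [h]
    simp only [pvLen_cons, pvLen_nil]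
    omega

theorem pvFlat_le (L : List String) : pvLen ((L.map pvA_halve).flatten) ≤ pvLen L := by
  induction L with
  | nil => simp [pvLen_nil]
  | cons f L' ih =>
    simp only [List.map_cons, List.flatten_cons]
    rw [pvLen_append, pvLen_cons]
    have := (pvHalve_len f).1
    omega

theorem pvHalve_ne_single (f h1 h2 : String) (he : f.toList = h1.toList ++ ' ' :: h2.toList)
    (h : pvA_halve f = [h1, h2]) : pvA_halve f ≠ [f] := by
  rw [h]
  intro hEq
  have h1f : h1 = f := by injection hEq
  subst h1f
  have := congrArg List.length he
  simp at this

theorem pvFlat_lt (L : List String) (h : (L.map pvA_halve).flatten ≠ L) :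
    pvLen ((L.map pvA_halve).flatten) < pvLen L := by
  induction L with
  | nil => simp at h
  | cons f L' ih =>
    simp only [List.map_cons, List.flatten_cons] at h ⊢
    rw [pvLen_append, pvLen_cons]
    rcases pvHalve_cases f with hf | ⟨h1, h2, hf, he⟩
    · rw [hf] at h ⊢
      have hne : (L'.map pvA_halve).flatten ≠ L' := by
        intro hEq; exact h (by rw [hEq]; rfl)
      have := ih hne
      simp only [pvLen_cons, pvLen_nil]
      omega
    · have hlt := (pvHalve_len f).2 (pvHalve_ne_single f h1 h2 he hf)
      have hle := pvFlat_le L'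
      omega

def pvA_isChanged : List String → List String → Nat → Bool
  | [], _, _ => false
  | c :: rest, xs, i =>
    match xs[i]? with
    | none => true
    | some s => if c ≠ s then true else pvA_isChanged rest xs (i + 1)

def pvA_halve_str_arr (str_arr : List String) : Option (List String) :=
  let flatten := (str_arr.map pvA_halve).flatten
  if pvA_isChanged flatten str_arr 0 then some flatten else none

theorem pvIsChanged_self (L P : List String) :
    pvA_isChanged L (P ++ L) P.length = false := by
  induction L generalizing P with
  | nil => simp [pvA_isChanged]
  | cons c rest ih =>
    have hget : (P ++ c :: rest)[P.length]? = some c := by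
      rw [List.getElem?_append_right (le_refl _)]
      simp
    simp only [pvA_isChanged, hget]
    rw [if_neg (by simp)]
    have := ih (P ++ [c])
    simpa using this

theorem pvHalveArr_some_lt (xs nxt : List String) (h : pvA_halve_str_arr xs = some nxt) :
    pvLen nxt < pvLen xs := by
  unfold pvA_halve_str_arr at h
  simp only [] at h
  split at h
  · next hch =>
    injection h with h'
    subst h'
    apply pvFlat_lt
    intro hEq
    rw [hEq] at hch
    have hz := pvIsChanged_self xs []
    simp only [List.nil_append, List.length_nil] at hz
    rw [hz] at hch
    exact Bool.false_ne_true hch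
  · exact absurd h (by simp)

def pvA_loop (halved_q : List String) (w : String) (acc : Int) : Int :=
  if halved_q = [] then acc
  else
    let acc' := halved_q.foldl
      (fun a query => if PySem.Str.isIn (PySem.Str.lower query) (PySem.Str.lower w) then a + 1 else a) acc
    match h : pvA_halve_str_arr halved_q with
    | none => acc'
    | some nxt => pvA_loop nxt w acc'
termination_by pvLen halved_q
decreasing_by exact pvHalveArr_some_lt _ _ h

def pvA_go : List String → String → Int
  | [], _ => 0
  | w :: rest, q => pvA_loop [q] w 0 + pvA_go rest q

def split_str_search (string : String) (q : String) : Int :=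
  pvA_go ((PySem.Str.split? string " ").getD []) q

-- ===== PORT B =====
def pvB_halve (f : String) : Option (String × String) :=
  let ws := (PySem.Str.split? f " ").getD []
  let h := (ws.length + 1) / 2
  if h < ws.length then
    some (PySem.Str.join " " (ws.take h), PySem.Str.join " " (ws.drop h))
  else none

-- decomposition of B's halving step (feeds B's termination measure)
theorem pvB_halve_decomp (f a b : String) (h : pvB_halve f = some (a, b)) :
    f.toList = a.toList ++ ' ' :: b.toList := by
  unfold pvB_halve at h
  rw [pvWs_eq] at h
  by_cases hk : ((((pvMySplit ' ' f.toList).map String.ofList).length + 1) / 2)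
      < ((pvMySplit ' ' f.toList).map String.ofList).length
  · rw [if_pos hk] at h
    injection h with h'
    have ha := congrArg Prod.fst h'
    have hb := congrArg Prod.snd h'
    simp only [] at ha hb
    rw [← ha, ← hb]
    have hk' : 1 < (pvMySplit ' ' f.toList).length := by
      simp only [List.length_map] at hk; omega
    have hh1 : 1 ≤ (((pvMySplit ' ' f.toList).map String.ofList).length + 1) / 2 := by
      simp only [List.length_map]; omega
    have hh2 : (((pvMySplit ' ' f.toList).map String.ofList).length + 1) / 2
        < (pvMySplit ' ' f.toList).length := by
      simp only [List.length_map]; omega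
    rw [PySem.Str.toList_join, PySem.Str.toList_join]
    rw [← List.map_take, ← List.map_drop]
    simp only [List.map_map]
    have hcomp : (String.toList ∘ String.ofList) = id := by
      funext l; simp
    rw [hcomp, List.map_id, List.map_id]
    have hsp : (" " : String).toList = [' '] := by decide
    rw [hsp]
    have hjoin : PySem.Chars.join [' ']
        ((pvMySplit ' ' f.toList).take ((((pvMySplit ' ' f.toList).map String.ofList).length + 1) / 2)
          ++ (pvMySplit ' ' f.toList).drop ((((pvMySplit ' ' f.toList).map String.ofList).length + 1) / 2))
        = PySem.Chars.join [' '] ((pvMySplit ' ' f.toList).take ((((pvMySplit ' ' f.toList).map String.ofList).length + 1) / 2))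
          ++ ' ' :: PySem.Chars.join [' '] ((pvMySplit ' ' f.toList).drop ((((pvMySplit ' ' f.toList).map String.ofList).length + 1) / 2)) := by
      apply pvJoin_append
      · rw [Ne, List.take_eq_nil_iff]
        rintro (h | h)
        · omega
        · exact pvMySplit_ne_nil _ _ h
      · rw [Ne, List.drop_eq_nil_iff]
        omega
    rw [← hjoin, List.take_append_drop, pvJoin_mySplit]
  · rw [if_neg hk] at h
    exact absurd h (by simp)

theorem pvB_halve_lt (f a b : String) (h : pvB_halve f = some (a, b)) :
    a.toList.length < f.toList.length ∧ b.toList.length < f.toList.length := by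
  have he := pvB_halve_decomp f a b h
  have := congrArg List.length he
  simp only [List.length_append, List.length_cons] at this
  omega

def pvB_sd (f : String) : Nat :=
  match h : pvB_halve f with
  | none => 0
  | some (a, b) => 1 + max (pvB_sd a) (pvB_sd b)
termination_by f.toList.length
decreasing_by
  · exact (pvB_halve_lt f a b h).1
  · exact (pvB_halve_lt f a b h).2

def pvB_rec (f : String) (r : Int) : List (String × Int) :=
  match h : pvB_halve f with
  | none => [(f, r + 1)]
  | some (a, b) => (f, 1) :: (pvB_rec a (r - 1) ++ pvB_rec b (r - 1))
termination_by f.toList.length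
decreasing_by
  · exact (pvB_halve_lt f a b h).1
  · exact (pvB_halve_lt f a b h).2

def pvB_frags (q : String) : List (String × Int) := pvB_rec q ((pvB_sd q : Nat) : Int)

def split_str_search_alt (string : String) (q : String) : Int :=
  let frags := pvB_frags q
  let words := (PySem.Str.split? string " ").getD []
  if words.length = 0 then 0
  else
    words.foldl (fun total w =>
      frags.foldl (fun t fm =>
        if PySem.Str.isIn (PySem.Str.lower fm.1) (PySem.Str.lower w) then t + fm.2 else t) total) 0

-- ===== PRECONDITION & SPEC =====
def Spec_split_str_search (string : String) (q : String) (out : Int) : Prop := out = split_str_search_alt string q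
instance (string : String) (q : String) (out : Int) : Decidable (Spec_split_str_search string q out) := by unfold Spec_split_str_search; infer_instance

-- ===== CLAIM (what is proved, stated in full; the proofs are below) =====
def Claim_equal_split_str_search : Prop := ∀ (string : String) (q : String), Dom_split_str_search string q → Spec_split_str_search string q (split_str_search string q)

-- ===== LEMMAS AND PROOFS =====
def pvStep (L : List String) : List String := (L.map pvA_halve).flatten

def pvCnt (L : List String) (w : String) : Int :=
  (L.countP (fun f => PySem.Str.isIn (PySem.Str.lower f) (PySem.Str.lower w)) : Int)

def pvSumLv : List String → Nat → String → Int
  | L, 0, w => pvCnt L w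
  | L, s + 1, w => pvCnt L w + pvSumLv (pvStep L) s w

def pvSdL (L : List String) : Nat := (L.map pvB_sd).foldr max 0

def pvFragCnt (frags : List (String × Int)) (w : String) : Int :=
  (frags.map (fun fm =>
    if PySem.Str.isIn (PySem.Str.lower fm.1) (PySem.Str.lower w) then fm.2 else 0)).sum

theorem pvB_halve_eqA (f : String) :
    pvA_halve f = (match pvB_halve f with | none => [f] | some (a, b) => [a, b]) := by
  unfold pvA_halve pvB_halve
  by_cases hk : ((PySem.Str.split? f " ").getD []).length > 1
  · have hk2 : (((PySem.Str.split? f " ").getD []).length + 1) / 2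
        < ((PySem.Str.split? f " ").getD []).length := by omega
    simp only [if_pos hk, if_pos hk2]
  · have hk2 : ¬ ((((PySem.Str.split? f " ").getD []).length + 1) / 2
        < ((PySem.Str.split? f " ").getD []).length) := by omega
    simp only [if_neg hk, if_neg hk2]

theorem pvB_sd_none (f : String) (h : pvB_halve f = none) : pvB_sd f = 0 := by
  conv_lhs => rw [pvB_sd.eq_def]
  split <;> simp_all

theorem pvB_sd_some (f a b : String) (h : pvB_halve f = some (a, b)) :
    pvB_sd f = 1 + max (pvB_sd a) (pvB_sd b) := by
  conv_lhs => rw [pvB_sd.eq_def]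
  split <;> simp_all

theorem pvB_rec_none (f : String) (r : Int) (h : pvB_halve f = none) :
    pvB_rec f r = [(f, r + 1)] := by
  conv_lhs => rw [pvB_rec.eq_def]
  split <;> simp_all

theorem pvB_rec_some (f a b : String) (r : Int) (h : pvB_halve f = some (a, b)) :
    pvB_rec f r = (f, 1) :: (pvB_rec a (r - 1) ++ pvB_rec b (r - 1)) := by
  conv_lhs => rw [pvB_rec.eq_def]
  split <;> simp_all

theorem pvStep_eq_iff (L : List String) : pvStep L = L ↔ ∀ f ∈ L, pvB_halve f = none := by
  induction L with
  | nil => simp [pvStep]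
  | cons f t ih =>
    simp only [pvStep, List.map_cons, List.flatten_cons] at ih ⊢
    constructor
    · intro h
      cases hb : pvB_halve f with
      | none =>
        have hf : pvA_halve f = [f] := by rw [pvB_halve_eqA, hb]
        rw [hf, List.singleton_append] at h
        have ht := ih.mp (by injection h)
        intro g hg
        rcases List.mem_cons.mp hg with hg | hg
        · rw [hg]; exact hb
        · exact ht g hg
      | some ab =>
        obtain ⟨a, b⟩ := ab
        have hf : pvA_halve f = [a, b] := by rw [pvB_halve_eqA, hb]
        rw [hf] at h
        have ha : a = f := by injection h
        have := pvB_halve_decomp f a b hb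
        rw [ha] at this
        exact absurd (congrArg List.length this) (by simp)
    · intro h
      have hf : pvA_halve f = [f] := by rw [pvB_halve_eqA, h f (by simp)]
      rw [hf, List.singleton_append]
      have := ih.mpr (fun g hg => h g (by simp [hg]))
      rw [this]

theorem pvSdL_append (a b : List String) : pvSdL (a ++ b) = max (pvSdL a) (pvSdL b) := by
  induction a with
  | nil => simp [pvSdL]
  | cons x xs ih =>
    simp only [pvSdL, List.cons_append, List.map_cons, List.foldr_cons] at ih ⊢
    omega

theorem pvSdL_step (L : List String) : pvSdL (pvStep L) = pvSdL L - 1 := by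
  induction L with
  | nil => simp [pvSdL, pvStep]
  | cons f t ih =>
    have hstepcons : pvStep (f :: t) = pvA_halve f ++ pvStep t := by
      simp [pvStep]
    rw [hstepcons, pvSdL_append, ih]
    cases hb : pvB_halve f with
    | none =>
      have hf : pvA_halve f = [f] := by rw [pvB_halve_eqA, hb]
      rw [hf]
      have h0 := pvB_sd_none f hb
      simp only [pvSdL, List.map_cons, List.map_nil, List.foldr_cons, List.foldr_nil, h0]
      omega
    | some ab =>
      obtain ⟨a, b⟩ := ab
      have hf : pvA_halve f = [a, b] := by rw [pvB_halve_eqA, hb]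
      rw [hf]
      have hs := pvB_sd_some f a b hb
      simp only [pvSdL, List.map_cons, List.map_nil, List.foldr_cons, List.foldr_nil, hs]
      omega

theorem pvSd_mem_le (L : List String) (f : String) (h : f ∈ L) : pvB_sd f ≤ pvSdL L := by
  induction L with
  | nil => simp at h
  | cons x t ih =>
    rcases List.mem_cons.mp h with rfl | h
    · simp only [pvSdL, List.map_cons, List.foldr_cons]
      omega
    · have := ih h
      simp only [pvSdL, List.map_cons, List.foldr_cons] at this ⊢
      omega

theorem pvSdL_zero (L : List String) (h : ∀ f ∈ L, pvB_sd f = 0) : pvSdL L = 0 := by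
  induction L with
  | nil => simp [pvSdL]
  | cons x t ih =>
    have hx := h x (by simp)
    have ht := ih (fun g hg => h g (by simp [hg]))
    simp only [pvSdL, List.map_cons, List.foldr_cons] at ht ⊢
    omega

theorem pvFoldlCnt (L : List String) (w : String) (acc : Int) :
    L.foldl (fun a f => if PySem.Str.isIn (PySem.Str.lower f) (PySem.Str.lower w) then a + 1 else a) acc
      = acc + pvCnt L w := by
  rw [PySem.List.foldl_if_add_one]; rfl

theorem pvFoldlFrag (frags : List (String × Int)) (w : String) (acc : Int) :
    frags.foldl (fun t fm =>
        if PySem.Str.isIn (PySem.Str.lower fm.1) (PySem.Str.lower w) then t + fm.2 else t) acc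
      = acc + pvFragCnt frags w := by
  induction frags generalizing acc with
  | nil => simp [pvFragCnt]
  | cons fm rest ih =>
    simp only [List.foldl_cons]
    rw [ih]
    simp only [pvFragCnt, List.map_cons, List.sum_cons]
    split_ifs <;> ring

theorem pvIsChanged_flat (L P : List String) :
    pvA_isChanged ((L.map pvA_halve).flatten) (P ++ L) P.length
      = decide ((L.map pvA_halve).flatten ≠ L) := by
  induction L generalizing P with
  | nil => simp [pvA_isChanged]
  | cons f L' ih =>
    rcases pvHalve_cases f with hf | ⟨h1, h2, hf, he⟩
    · simp only [List.map_cons, List.flatten_cons, hf, List.singleton_append]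
      have hget : (P ++ f :: L')[P.length]? = some f := by
        rw [List.getElem?_append_right (le_refl _)]; simp
      simp only [pvA_isChanged, hget]
      rw [if_neg (by simp)]
      have := ih (P ++ [f])
      simp only [List.append_assoc, List.singleton_append, List.length_append,
        List.length_cons, List.length_nil] at this
      rw [this]
      simp
    · simp only [List.map_cons, List.flatten_cons, hf]
      have hget : (P ++ f :: L')[P.length]? = some f := by
        rw [List.getElem?_append_right (le_refl _)]; simp
      have hne : h1 ≠ f := by
        intro hEq
        subst hEq
        have := congrArg List.length he
        simp at this
      simp only [List.cons_append, pvA_isChanged, hget]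
      rw [if_pos hne]
      have hlist : h1 :: h2 :: ((L'.map pvA_halve).flatten) ≠ f :: L' := by
        intro hEq
        exact hne (by injection hEq)
      simp [hlist]

theorem pvLoop_sumLv (w : String) (n : Nat) :
    ∀ (L : List String) (acc : Int), pvLen L ≤ n →
      pvA_loop L w acc = acc + pvSumLv L (pvSdL L) w := by
  induction n using Nat.strong_induction_on with
  | _ n ih =>
    intro L acc hn
    rw [pvA_loop]
    by_cases hL : L = []
    · subst hL
      rw [if_pos rfl]
      simp [pvSumLv, pvSdL, pvCnt]
    · rw [if_neg hL]
      have hiff := pvIsChanged_flat L []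
      simp only [List.nil_append, List.length_nil] at hiff
      cases hA : pvA_halve_str_arr L with
      | none =>
        have hch : pvA_isChanged ((L.map pvA_halve).flatten) L 0 = false := by
          unfold pvA_halve_str_arr at hA
          simp only [] at hA
          split at hA
          · exact absurd hA (by simp)
          · next hniff => simpa using hniff
        have hfix : pvStep L = L := by
          rw [hch] at hiff
          by_contra hne
          simp only [pvStep] at hne
          simp [hne] at hiff
        have hzero : pvSdL L = 0 :=
          pvSdL_zero L (fun f hf => pvB_sd_none f ((pvStep_eq_iff L).mp hfix f hf))
        simp only [hA, hzero]
        show L.foldl _ acc = acc + pvSumLv L 0 w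
        rw [pvFoldlCnt]
        rfl
      | some nxt =>
        have hchn : pvA_isChanged ((L.map pvA_halve).flatten) L 0 = true ∧
            nxt = (L.map pvA_halve).flatten := by
          unfold pvA_halve_str_arr at hA
          simp only [] at hA
          split at hA
          · next hT => exact ⟨hT, by injection hA with h'; exact h'.symm⟩
          · exact absurd hA (by simp)
        obtain ⟨hch, hnxt⟩ := hchn
        have hne : pvStep L ≠ L := by
          rw [hch] at hiff
          intro hEq
          simp only [pvStep] at hEq
          simp [hEq] at hiff
        have hpos : 1 ≤ pvSdL L := by
          have hex : ¬ ∀ f ∈ L, pvB_halve f = none := fun hall =>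
            hne ((pvStep_eq_iff L).mpr hall)
          push_neg at hex
          obtain ⟨f, hfL, hfne⟩ := hex
          cases hb : pvB_halve f with
          | none => exact absurd hb hfne
          | some ab =>
            obtain ⟨a, b⟩ := ab
            have := pvB_sd_some f a b hb
            have hle := pvSd_mem_le L f hfL
            omega
        have hlt : pvLen nxt < pvLen L := pvHalveArr_some_lt L nxt hA
        simp only [hA]
        rw [pvFoldlCnt]
        rw [ih (pvLen nxt) (by omega) nxt (acc + pvCnt L w) (le_refl _)]
        have hsd : pvSdL L = (pvSdL L - 1) + 1 := by omega
        have hsn : pvSdL nxt = pvSdL L - 1 := by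
          rw [hnxt]
          exact pvSdL_step L
        rw [hsd]
        show acc + pvCnt L w + pvSumLv nxt (pvSdL nxt) w
          = acc + (pvCnt L w + pvSumLv (pvStep L) (pvSdL L - 1) w)
        rw [hsn, hnxt]
        show acc + pvCnt L w + pvSumLv (pvStep L) (pvSdL L - 1) w
          = acc + (pvCnt L w + pvSumLv (pvStep L) (pvSdL L - 1) w)
        ring

theorem pvCnt_append (a b : List String) (w : String) :
    pvCnt (a ++ b) w = pvCnt a w + pvCnt b w := by
  simp [pvCnt, List.countP_append]

theorem pvStep_append (a b : List String) : pvStep (a ++ b) = pvStep a ++ pvStep b := by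
  simp [pvStep]

theorem pvSumLv_append (s : Nat) :
    ∀ (a b : List String) (w : String),
      pvSumLv (a ++ b) s w = pvSumLv a s w + pvSumLv b s w := by
  induction s with
  | zero => intro a b w; simp [pvSumLv, pvCnt_append]
  | succ s ih =>
    intro a b w
    show pvCnt (a ++ b) w + pvSumLv (pvStep (a ++ b)) s w = _
    rw [pvCnt_append, pvStep_append, ih]
    show _ = pvCnt a w + pvSumLv (pvStep a) s w + (pvCnt b w + pvSumLv (pvStep b) s w)
    ring

theorem pvSumLv_fixed (s : Nat) (L : List String) (w : String) (h : pvStep L = L) :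
    pvSumLv L s w = ((s : Int) + 1) * pvCnt L w := by
  induction s with
  | zero => simp [pvSumLv]
  | succ s ih =>
    show pvCnt L w + pvSumLv (pvStep L) s w = _
    rw [h, ih]
    push_cast
    ring

theorem pvCnt_single (f w : String) :
    pvCnt [f] w = if PySem.Str.isIn (PySem.Str.lower f) (PySem.Str.lower w) then 1 else 0 := by
  simp only [pvCnt, List.countP_cons, List.countP_nil]
  split_ifs <;> simp_all

theorem pvRec_sumLv (w : String) (n : Nat) :
    ∀ (f : String) (r : Nat), f.toList.length ≤ n → pvB_sd f ≤ r →
      pvFragCnt (pvB_rec f ((r : Nat) : Int)) w = pvSumLv [f] r w := by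
  induction n using Nat.strong_induction_on with
  | _ n ih =>
    intro f r hn hsd
    cases hb : pvB_halve f with
    | none =>
      rw [pvB_rec_none f _ hb]
      have hfixf : pvStep [f] = [f] := by
        show pvA_halve f ++ [] = [f]
        rw [pvB_halve_eqA, hb]
        rfl
      rw [pvSumLv_fixed r [f] w hfixf, pvCnt_single]
      simp only [pvFragCnt, List.map_cons, List.map_nil, List.sum_cons, List.sum_nil]
      split_ifs <;> ring
    | some ab =>
      obtain ⟨a, b⟩ := ab
      have hsdf := pvB_sd_some f a b hb
      obtain ⟨r', hr'⟩ : ∃ r', r = r' + 1 := ⟨r - 1, by omega⟩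
      subst hr'
      have hcast : ((r' + 1 : Nat) : Int) - 1 = ((r' : Nat) : Int) := by push_cast; ring
      rw [pvB_rec_some f a b _ hb, hcast]
      have hla := (pvB_halve_lt f a b hb).1
      have hlb := (pvB_halve_lt f a b hb).2
      have hia := ih a.toList.length (by omega) a r' (le_refl _) (by omega)
      have hib := ih b.toList.length (by omega) b r' (le_refl _) (by omega)
      have hstepf : pvStep [f] = [a] ++ [b] := by
        show pvA_halve f ++ [] = [a] ++ [b]
        rw [pvB_halve_eqA, hb]
        rfl
      show pvFragCnt ((f, 1) :: (pvB_rec a _ ++ pvB_rec b _)) w = pvSumLv [f] (r' + 1) w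
      have hsum : pvSumLv [f] (r' + 1) w
          = pvCnt [f] w + (pvSumLv [a] r' w + pvSumLv [b] r' w) := by
        show pvCnt [f] w + pvSumLv (pvStep [f]) r' w = _
        rw [hstepf, pvSumLv_append]
      rw [hsum, ← hia, ← hib, pvCnt_single]
      simp only [pvFragCnt, List.map_cons, List.map_append, List.sum_cons, List.sum_append]

theorem pvSdL_single (q : String) : pvSdL [q] = pvB_sd q := by
  simp [pvSdL]

theorem pvWords_fold (q : String) (ws : List String) (acc : Int) :
    ws.foldl (fun total w =>
        (pvB_frags q).foldl (fun t fm =>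
          if PySem.Str.isIn (PySem.Str.lower fm.1) (PySem.Str.lower w) then t + fm.2 else t) total) acc
      = acc + pvA_go ws q := by
  induction ws generalizing acc with
  | nil => simp [pvA_go]
  | cons w rest ih =>
    simp only [List.foldl_cons, pvA_go]
    rw [pvFoldlFrag, ih]
    have hfrag : pvFragCnt (pvB_frags q) w = pvSumLv [q] (pvB_sd q) w := by
      unfold pvB_frags
      exact pvRec_sumLv w q.toList.length q (pvB_sd q) (le_refl _) (le_refl _)
    have hloop : pvA_loop [q] w 0 = 0 + pvSumLv [q] (pvSdL [q]) w :=
      pvLoop_sumLv w (pvLen [q]) [q] 0 (le_refl _)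
    rw [hfrag]
    rw [pvSdL_single] at hloop
    rw [← hfrag] at hloop
    rw [hfrag] at hloop
    omega

-- ===== VERDICT (by name: the statement is the Claim_ definition above) =====
theorem split_str_search_spec : Claim_equal_split_str_search := by
  intro string q _
  unfold Spec_split_str_search
  unfold split_str_search split_str_search_alt
  by_cases h0 : ((PySem.Str.split? string " ").getD []).length = 0
  · have hnil : ((PySem.Str.split? string " ").getD []) = [] :=
      List.length_eq_zero_iff.mp h0
    rw [hnil]
    simp [pvA_go]
  · show pvA_go ((PySem.Str.split? string " ").getD []) q
      = if ((PySem.Str.split? string " ").getD []).length = 0 then 0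
        else ((PySem.Str.split? string " ").getD []).foldl
          (fun total w => (pvB_frags q).foldl (fun t fm =>
            if PySem.Str.isIn (PySem.Str.lower fm.1) (PySem.Str.lower w) then t + fm.2 else t) total) 0
    rw [if_neg h0, pvWords_fold]
    ring
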